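-- pv_equiv track=rewrite | github.com/ViolaChenYT/hybridVAE | wae1d/scvi_newall.py | expand_choices
-- ===== SOURCE A (Python) =====
-- from itertools import product
--
-- def expand_choices(items, sep="/", strip=True, dedup=False):
--     """
--     items: list[str] possibly containing 'a/b' meaning choose one
--     returns: list[list[str]] of all expanded lists
--     """
--     # turn each item into a list of options
--     opts = []
--     for s in items:
--         parts = s.split(sep)
--         if strip:
--             parts = [p.strip() for p in parts]
--         # if no sep, keep as single option; if sep, use all parts
--         opts.append(parts if len(parts) > 1 else [parts[0]])
--     # Cartesian product over positions
--     combos = [list(choice) for choice in product(*opts)]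
--     if dedup:  # remove duplicate lists if options had duplicates
--         seen = set()
--         uniq = []
--         for c in combos:
--             t = tuple(c)
--             if t not in seen:
--                 seen.add(t); uniq.append(c)
--         return uniq
--     return combos
-- ===== SOURCE B (Python) =====
-- def expand_choices(items, sep="/", strip=True, dedup=False):
--     """
--     items: list[str] possibly containing 'a/b' meaning choose one
--     returns: list[list[str]] of all expanded lists
--     """
--     # Build all combinations as suffix-sharing (option, rest) chains, right to left:
--     # each step prepends every option of the current item to every existing chain,
--     # so partial suffixes are shared instead of copied.
--     chains = [None]
--     for s in reversed(items):
--         options = s.split(sep)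
--         if strip:
--             options = [p.strip() for p in options]
--         chains = [(o, rest) for o in options for rest in chains]
--     combos = []
--     for node in chains:
--         combo = []
--         while node is not None:
--             combo.append(node[0])
--             node = node[1]
--         combos.append(combo)
--     if dedup:
--         combos = [list(t) for t in dict.fromkeys(map(tuple, combos))]
--     return combos
-- ===== Notes on version B (the rewrite author's own statement) =====
-- stated objective: alternative
-- what changed: B drops itertools.product over a precomputed options matrix and instead folds right-to-left over the items, building suffix-sharing (option, rest) chains that are flattened once at the end, and dedups via dict.fromkeys on tuples instead of A's explicit seen-set loop.
import Mathlib
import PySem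

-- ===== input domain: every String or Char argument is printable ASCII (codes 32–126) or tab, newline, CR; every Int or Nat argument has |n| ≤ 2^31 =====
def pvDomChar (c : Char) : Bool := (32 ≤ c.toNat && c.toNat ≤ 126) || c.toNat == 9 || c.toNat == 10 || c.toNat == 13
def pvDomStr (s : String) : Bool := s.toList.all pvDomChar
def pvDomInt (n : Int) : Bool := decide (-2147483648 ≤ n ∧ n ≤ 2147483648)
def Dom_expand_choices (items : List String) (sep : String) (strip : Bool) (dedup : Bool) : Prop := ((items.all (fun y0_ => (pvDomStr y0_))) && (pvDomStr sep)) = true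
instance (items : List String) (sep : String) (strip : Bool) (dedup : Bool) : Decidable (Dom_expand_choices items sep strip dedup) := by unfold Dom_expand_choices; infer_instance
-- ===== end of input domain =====

-- B replaces itertools.product over a precomputed options matrix by a right-to-left fold
-- building suffix-sharing (option, rest) chains, and the seen-set dedup loop by a
-- first-occurrence dedup (dict.fromkeys); objective: alternative decomposition, same cost.

-- ===== PORT A =====
-- itertools.product(*opts) as lists (later positions vary fastest); the comprehension
-- [list(choice) for choice in product(*opts)] converts each tuple to a list, which is the
-- identity under the type convention (tuples and lists both become List String).
def pvProduct (opts : List (List String)) : List (List String) :=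
  match opts with
  | [] => [[]]
  | l :: ls => l.flatMap (fun x => (pvProduct ls).map (fun rest => x :: rest))

def expand_choices (items : List String) (sep : String) (strip : Bool) (dedup : Bool) : List (List String) :=
  -- opts = []; for s in items: parts = s.split(sep); [p.strip() …]; opts.append(parts if len(parts)>1 else [parts[0]])
  let opts := items.foldl (fun opts s =>
    let parts0 := (PySem.Str.split? s sep).getD []   -- none = ValueError for sep="" (outside Pre_)
    let parts := if strip then parts0.map PySem.Str.strip else parts0
    opts ++ [if parts.length > 1 then parts else [PySem.List.pyGetD parts 0 ""]]) []
  let combos := pvProduct opts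
  if dedup then
    -- seen = set(); uniq = []; for c in combos: if tuple(c) not in seen: seen.add; uniq.append
    (combos.foldl (fun su c =>
      if PySem.Set.contains su.1 c then su
      else (PySem.Set.add su.1 c, su.2 ++ [c])) ((PySem.Set.empty : PySem.Set (List String)), [])).2
  else combos

-- ===== PORT B =====
def expand_choices_alt (items : List String) (sep : String) (strip : Bool) (dedup : Bool) : List (List String) :=
  -- chains = [None]; for s in reversed(items): chains = [(o, rest) for o in options for rest in chains]
  -- a (o, rest)/None chain IS a cons-list, so its type here is List String and the final
  -- flattening loop of Source B is the identity.
  let chains := items.reverse.foldl (fun chains s =>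
    let options0 := (PySem.Str.split? s sep).getD []
    let options := if strip then options0.map PySem.Str.strip else options0
    options.flatMap (fun o => chains.map (fun rest => o :: rest))) [[]]
  let combos := chains
  if dedup then PySem.List.dedup combos   -- dict.fromkeys over tuples; tuple↔list conversion is the identity here
  else combos

-- ===== PRECONDITION & SPEC =====
-- Pre_ excludes exactly the inputs where A raises: s.split("") is a ValueError, reached iff
-- sep = "" and the loop body runs at least once (items ≠ []).
def Pre_expand_choices (items : List String) (sep : String) (strip : Bool) (dedup : Bool) : Prop :=
  sep ≠ "" ∨ items = []
instance (items : List String) (sep : String) (strip : Bool) (dedup : Bool) : Decidable (Pre_expand_choices items sep strip dedup) := by unfold Pre_expand_choices; infer_instance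
def pvWitness_expand_choices : List String × String × Bool × Bool := ((["a/b", " c"], "/", true, true))
def Spec_expand_choices (items : List String) (sep : String) (strip : Bool) (dedup : Bool) (out : List (List String)) : Prop := out = expand_choices_alt items sep strip dedup
instance (items : List String) (sep : String) (strip : Bool) (dedup : Bool) (out : List (List String)) : Decidable (Spec_expand_choices items sep strip dedup out) := by unfold Spec_expand_choices; infer_instance

-- ===== CLAIM (what is proved, stated in full; the proofs are below) =====
def Claim_equal_expand_choices : Prop := ∀ (items : List String) (sep : String) (strip : Bool) (dedup : Bool), Dom_expand_choices items sep strip dedup → Pre_expand_choices items sep strip dedup → Spec_expand_choices items sep strip dedup (expand_choices items sep strip dedup)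

-- ===== LEMMAS AND PROOFS =====

-- the per-item options computation both ports share (proof-only abbreviation)
def pvOpts (sep : String) (strip : Bool) (s : String) : List String :=
  let options0 := (PySem.Str.split? s sep).getD []
  if strip then options0.map PySem.Str.strip else options0

-- splitOn's worker always produces at least one piece
theorem pv_go_ne_nil (sep : List Char) (fuel : Nat) (l cur : List Char) (acc : List (List Char)) :
    PySem.Chars.splitOn.go sep fuel l cur acc ≠ [] := by
  induction fuel generalizing l cur acc with
  | zero => simp [PySem.Chars.splitOn.go]
  | succ n ih =>
    rw [PySem.Chars.splitOn.go.eq_def]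
    cases l with
    | nil => simp
    | cons c rest =>
      simp only []
      split_ifs <;> apply ih

-- s.split(sep) for sep ≠ "" is a nonempty list
theorem pv_split_ne_nil (s sep : String) (h : sep ≠ "") :
    (PySem.Str.split? s sep).getD [] ≠ [] := by
  have hsep : sep.toList ≠ [] := fun hl => h (String.toList_eq_nil_iff.mp hl)
  simp only [PySem.Str.split?, PySem.Chars.split?, List.isEmpty_iff, hsep, if_false,
    PySem.Chars.splitOn, Option.map_some, Option.getD_some, ne_eq, List.map_eq_nil_iff]
  exact pv_go_ne_nil _ _ _ _ _

-- A's "parts if len(parts) > 1 else [parts[0]]" is just parts when parts is nonempty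
theorem pv_keep_parts (parts : List String) (h : parts ≠ []) :
    (if parts.length > 1 then parts else [PySem.List.pyGetD parts 0 ""]) = parts := by
  cases parts with
  | nil => exact absurd rfl h
  | cons x xs =>
    cases xs with
    | nil => simp [PySem.List.pyGetD_zero_cons]
    | cons y ys => simp

-- A's per-item value coincides with the shared options computation when sep ≠ ""
theorem pv_opts_eq (sep : String) (strip : Bool) (hsep : sep ≠ "") (s : String) :
    (let parts0 := (PySem.Str.split? s sep).getD []
     let parts := if strip then parts0.map PySem.Str.strip else parts0
     (if parts.length > 1 then parts else [PySem.List.pyGetD parts 0 ""]))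
    = pvOpts sep strip s := by
  apply pv_keep_parts
  cases strip <;> simp [pv_split_ne_nil s sep hsep]

-- B's right-to-left chain construction is a foldr computing the product of the option lists
theorem pv_foldr_product (g : String → List String) (ls : List String) :
    ls.foldr (fun s acc => (g s).flatMap (fun o => acc.map (fun rest => o :: rest))) [[]]
      = pvProduct (ls.map g) := by
  induction ls with
  | nil => rfl
  | cons s ls ih => simp [pvProduct, ih]

-- A's seen/uniq loop keeps seen = uniq and computes the foldl of Set.add
theorem pv_dedup_loop (cs : List (List String)) (s : PySem.Set (List String)) :
    (cs.foldl (fun su c =>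
        if PySem.Set.contains su.1 c then su
        else (PySem.Set.add su.1 c, su.2 ++ [c])) (s, s)).2
      = cs.foldl PySem.Set.add s := by
  induction cs generalizing s with
  | nil => rfl
  | cons c cs ih =>
    rw [List.foldl_cons, List.foldl_cons]
    by_cases h : PySem.Set.contains s c
    · rw [if_pos h]
      have ha : PySem.Set.add s c = s := by
        simp [PySem.Set.add, PySem.Set.contains] at h ⊢; simp [h]
      rw [ha]; exact ih s
    · rw [if_neg h]
      have ha : PySem.Set.add s c = s ++ [c] := by
        simp [PySem.Set.add, PySem.Set.contains] at h ⊢; simp [h]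
      rw [ha]; exact ih (s ++ [c])

-- ===== VERDICT (by name: the statement is the Claim_ definition above) =====
theorem expand_choices_spec : Claim_equal_expand_choices := by
  intro items sep strip dedup _ hpre
  unfold Spec_expand_choices expand_choices expand_choices_alt
  rcases hpre with hsep | hnil
  · -- A's opts loop builds the per-item option lists …
    have hopts :
        items.foldl (fun opts s =>
          let parts0 := (PySem.Str.split? s sep).getD []
          let parts := if strip then parts0.map PySem.Str.strip else parts0
          opts ++ [if parts.length > 1 then parts else [PySem.List.pyGetD parts 0 ""]]) []
        = items.map (pvOpts sep strip) := by
      rw [PySem.List.foldl_append_singleton_eq_map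
        (fun s => let parts0 := (PySem.Str.split? s sep).getD []
                  let parts := if strip then parts0.map PySem.Str.strip else parts0
                  (if parts.length > 1 then parts else [PySem.List.pyGetD parts 0 ""])) items []]
      simp only [List.nil_append]
      exact List.map_congr_left (fun s _ => pv_opts_eq sep strip hsep s)
    -- … and B's right-to-left chain fold computes their product
    have hacc :
        items.reverse.foldl (fun chains s =>
          let options0 := (PySem.Str.split? s sep).getD []
          let options := if strip then options0.map PySem.Str.strip else options0
          options.flatMap (fun o => chains.map (fun rest => o :: rest))) [[]]
        = pvProduct (items.map (pvOpts sep strip)) := by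
      rw [List.foldl_reverse]
      exact pv_foldr_product (pvOpts sep strip) items
    simp only [hopts, hacc]
    cases dedup
    · simp
    · simp only [if_true]
      rw [PySem.List.dedup_eq_ofList, PySem.Set.ofList_eq_foldl]
      exact pv_dedup_loop _ []
  · subst hnil
    cases dedup <;> rfl
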